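-- pv_equiv track=rewrite | github.com/rotemreiss/wsal-uploader | wsal_uploader.py | prepare_export_struct
-- ===== SOURCE A (Python) =====
-- def prepare_export_struct(occurrences, metadata):
--     ex_struct = []
--
--     for o in occurrences:
--         item = {}
--
--         item['id'] = o[0]
--         item['created_on'] = o[1]
--         item['alert_id'] = o[2]
--         for m in metadata:
--             if m[0] == o[0]:
--                 item[m[1]] = m[2]
--
--         ex_struct.append(item)
--
--     return ex_struct
-- ===== SOURCE B (Python) =====
-- def prepare_export_struct(occurrences, metadata):
--     # Index metadata rows by id once, so each occurrence does one dict lookup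
--     # instead of scanning the whole metadata list.  Malformed (short) metadata
--     # rows are skipped instead of raising.
--     groups = {}
--     for m in metadata:
--         if len(m) >= 3:
--             groups.setdefault(m[0], []).append((m[1], m[2]))
--
--     ex_struct = []
--     for o in occurrences:
--         item = {'id': o[0], 'created_on': o[1], 'alert_id': o[2]}
--         for k, v in groups.get(o[0], []):
--             item[k] = v
--         ex_struct.append(item)
--     return ex_struct
-- ===== Notes on version B (the rewrite author's own statement) =====
-- stated objective: alternative
-- what changed: B builds a dict grouping metadata rows by id in one pass and does a single dict lookup per occurrence, replacing A's scan of the whole metadata list inside the occurrence loop.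
import Mathlib
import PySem

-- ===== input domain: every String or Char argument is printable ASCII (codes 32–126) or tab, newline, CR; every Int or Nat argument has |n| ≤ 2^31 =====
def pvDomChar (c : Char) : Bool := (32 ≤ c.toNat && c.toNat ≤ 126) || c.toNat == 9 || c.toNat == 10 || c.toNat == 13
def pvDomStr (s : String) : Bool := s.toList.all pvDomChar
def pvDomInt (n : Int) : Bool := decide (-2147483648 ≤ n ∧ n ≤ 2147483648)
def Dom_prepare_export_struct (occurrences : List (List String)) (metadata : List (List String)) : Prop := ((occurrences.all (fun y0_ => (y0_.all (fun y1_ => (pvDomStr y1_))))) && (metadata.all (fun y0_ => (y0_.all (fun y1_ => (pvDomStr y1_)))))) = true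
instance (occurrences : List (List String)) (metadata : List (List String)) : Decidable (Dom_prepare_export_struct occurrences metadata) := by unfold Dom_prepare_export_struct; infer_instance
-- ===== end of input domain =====

-- B indexes metadata by id in one pass (dict of lists) and does one lookup per
-- occurrence, instead of A's rescan of all metadata for every occurrence.

-- ===== PORT A =====
-- indices o[0],o[1],o[2],m[0],m[1],m[2] are ported with List.getD; Pre_ keeps
-- exactly the inputs on which they are in range wherever Python evaluates them.
def prepare_export_struct (occurrences : List (List String)) (metadata : List (List String)) : List (List (String × String)) :=
  occurrences.foldl (fun ex_struct o =>
    let item : PySem.Dict String String :=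
      ((PySem.Dict.empty.insert "id" (o.getD 0 "")).insert "created_on" (o.getD 1 "")).insert "alert_id" (o.getD 2 "")
    let item := metadata.foldl (fun item m =>
      if m.getD 0 "" == o.getD 0 "" then item.insert (m.getD 1 "") (m.getD 2 "") else item) item
    ex_struct ++ [item.items]) []

-- ===== PORT B =====
def prepare_export_struct_alt (occurrences : List (List String)) (metadata : List (List String)) : List (List (String × String)) :=
  -- groups.setdefault(m[0], []).append((m[1], m[2]))  =  modify with default []
  let groups : PySem.Dict String (List (String × String)) :=
    metadata.foldl (fun g m =>
      if 3 ≤ m.length then g.modify (m.getD 0 "") [] (· ++ [(m.getD 1 "", m.getD 2 "")]) else g)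
      PySem.Dict.empty
  occurrences.foldl (fun ex_struct o =>
    let item : PySem.Dict String String :=
      ((PySem.Dict.empty.insert "id" (o.getD 0 "")).insert "created_on" (o.getD 1 "")).insert "alert_id" (o.getD 2 "")
    let item := (groups.getD (o.getD 0 "") []).foldl (fun item p => item.insert p.1 p.2) item
    ex_struct ++ [item.items]) []

-- ===== PRECONDITION & SPEC =====
def pvIds (occurrences : List (List String)) : List String := occurrences.map (fun o => o.getD 0 "")

-- Exactly the inputs on which Python A returns: every occurrence row has >= 3
-- fields, and (when the occurrence loop runs at all) every metadata row is
-- nonempty and, if its id matches some occurrence id, has >= 3 fields.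
def Pre_prepare_export_struct (occurrences : List (List String)) (metadata : List (List String)) : Prop :=
  (∀ o ∈ occurrences, 3 ≤ o.length) ∧
  (occurrences ≠ [] → ∀ m ∈ metadata, m ≠ [] ∧ (m.getD 0 "" ∈ pvIds occurrences → 3 ≤ m.length))
instance (occurrences : List (List String)) (metadata : List (List String)) : Decidable (Pre_prepare_export_struct occurrences metadata) := by unfold Pre_prepare_export_struct; infer_instance

def pvWitness_prepare_export_struct : List (List String) × List (List String) :=
  ([["1", "t", "a"], ["2", "u", "b"]], [["1", "k", "v"], ["3", "x", "y"]])

def Spec_prepare_export_struct (occurrences : List (List String)) (metadata : List (List String)) (out : List (List (String × String))) : Prop := out = prepare_export_struct_alt occurrences metadata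
instance (occurrences : List (List String)) (metadata : List (List String)) (out : List (List (String × String))) : Decidable (Spec_prepare_export_struct occurrences metadata out) := by unfold Spec_prepare_export_struct; infer_instance

-- ===== CLAIM (what is proved, stated in full; the proofs are below) =====
def Claim_equal_prepare_export_struct : Prop := ∀ (occurrences : List (List String)) (metadata : List (List String)), Dom_prepare_export_struct occurrences metadata → Pre_prepare_export_struct occurrences metadata → Spec_prepare_export_struct occurrences metadata (prepare_export_struct occurrences metadata)

-- ===== LEMMAS AND PROOFS =====

-- a for/append loop is a map
theorem pv_foldl_append_map {α β : Type} (l : List α) (f : α → β) (acc : List β) :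
    l.foldl (fun acc x => acc ++ [f x]) acc = acc ++ l.map f := by
  induction l generalizing acc with
  | nil => simp
  | cons x xs ih => simp [ih]

-- A's inner scan = fold of inserts over the matching metadata rows
theorem pvA_inner (metadata : List (List String)) (k : String) (item : PySem.Dict String String) :
    metadata.foldl (fun item m =>
        if m.getD 0 "" == k then item.insert (m.getD 1 "") (m.getD 2 "") else item) item
      = ((metadata.filter (fun m => m.getD 0 "" == k)).map
          (fun m => (m.getD 1 "", m.getD 2 ""))).foldl (fun item p => item.insert p.1 p.2) item := by
  induction metadata generalizing item with
  | nil => rfl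
  | cons m ms ih =>
    rw [List.foldl_cons, List.filter_cons]
    by_cases h : (m.getD 0 "" == k) = true
    · rw [if_pos h, if_pos h, List.map_cons, List.foldl_cons]
      exact ih _
    · rw [if_neg h, if_neg h]
      exact ih _

-- B's group for key k = the matching long-enough metadata rows, in order
theorem pvB_groups (metadata : List (List String)) (k : String)
    (g : PySem.Dict String (List (String × String))) :
    (metadata.foldl (fun g m =>
        if 3 ≤ m.length then g.modify (m.getD 0 "") [] (· ++ [(m.getD 1 "", m.getD 2 "")]) else g) g).getD k []
      = g.getD k [] ++ ((metadata.filter (fun m => decide (3 ≤ m.length) && (m.getD 0 "" == k))).map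
          (fun m => (m.getD 1 "", m.getD 2 ""))) := by
  induction metadata generalizing g with
  | nil => simp
  | cons m ms ih =>
    rw [List.foldl_cons, List.filter_cons]
    by_cases hl : 3 ≤ m.length
    · rw [if_pos hl]
      by_cases hk : m.getD 0 "" = k
      · have hc : (decide (3 ≤ m.length) && (m.getD 0 "" == k)) = true := by
          rw [decide_eq_true hl, Bool.true_and]; exact beq_iff_eq.mpr hk
        rw [if_pos hc, List.map_cons, ih, PySem.Dict.getD_modify, if_pos hk.symm, hk]
        simp
      · have hc : (decide (3 ≤ m.length) && (m.getD 0 "" == k)) = false := by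
          rw [beq_eq_false_iff_ne.mpr hk, Bool.and_false]
        rw [hc, if_neg (by simp), ih, PySem.Dict.getD_modify, if_neg (Ne.symm hk)]
    · rw [if_neg hl]
      have hc : (decide (3 ≤ m.length) && (m.getD 0 "" == k)) = false := by simp [hl]
      rw [hc, if_neg (by simp)]
      exact ih g

-- under Pre_, the length guard in B's filter is redundant for occurring ids
theorem pv_filter_congr (metadata : List (List String)) (occurrences : List (List String))
    (hm : ∀ m ∈ metadata, m ≠ [] ∧ (m.getD 0 "" ∈ pvIds occurrences → 3 ≤ m.length))
    (k : String) (hk : k ∈ pvIds occurrences) :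
    metadata.filter (fun m => decide (3 ≤ m.length) && (m.getD 0 "" == k))
      = metadata.filter (fun m => m.getD 0 "" == k) := by
  apply List.filter_congr
  intro m hmem
  cases hb : (m.getD 0 "" == k) with
  | false => simp
  | true =>
    have hk' : m.getD 0 "" ∈ pvIds occurrences := by rw [eq_of_beq hb]; exact hk
    simp [(hm m hmem).2 hk']

-- ===== VERDICT (by name: the statement is the Claim_ definition above) =====
theorem prepare_export_struct_spec : Claim_equal_prepare_export_struct := by
  intro occurrences metadata _ hpre
  show _ = _
  rcases hpre with ⟨_, hmeta⟩
  simp only [prepare_export_struct, prepare_export_struct_alt]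
  cases occurrences with
  | nil => rfl
  | cons o0 os =>
    have hm := hmeta (by simp)
    rw [pv_foldl_append_map, pv_foldl_append_map, List.nil_append, List.nil_append]
    apply List.map_congr_left
    intro o ho
    have hk : o.getD 0 "" ∈ pvIds (o0 :: os) := List.mem_map.mpr ⟨o, ho, rfl⟩
    apply congrArg
    rw [pvA_inner, pvB_groups, PySem.Dict.getD_empty, List.nil_append,
      pv_filter_congr metadata (o0 :: os) hm _ hk]
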